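-- pv_equiv track=rewrite | github.com/TechSphere10/TimeTable | genetic_timetable.py | _calculate_faculty_optimization
-- ===== SOURCE A (Python) =====
-- from typing import List, Dict, Any, Tuple
--
-- def _calculate_faculty_optimization(individual: Dict) -> float:
--     """Calculate faculty schedule optimization score"""
--     score = 0
--     faculty_daily_slots = {}
--
--     # Track faculty daily schedules
--     for day in individual:
--         for slot_id in individual[day]:
--             entry = individual[day][slot_id]
--             if entry:
--                 faculty = entry['faculty_name']
--                 if faculty not in faculty_daily_slots:
--                     faculty_daily_slots[faculty] = {}
--                 if day not in faculty_daily_slots[faculty]: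
--                     faculty_daily_slots[faculty][day] = []
--                 faculty_daily_slots[faculty][day].append(slot_id)
--
--     # Bonus for faculty having free periods at end of day
--     for faculty, daily_schedule in faculty_daily_slots.items():
--         for day, slots in daily_schedule.items():
--             if slots:
--                 max_slot = max(slots)
--                 if max_slot < 5:  # Faculty finishes before last period
--                     score += (5 - max_slot) * 2
--
--     return score
-- ===== SOURCE B (Python) =====
-- def _calculate_faculty_optimization(individual):
--     """Per-day fused pass: track each faculty's max slot for the day in a
--     small local dict, score it immediately, discard it before the next day."""
--     score = 0
--     for day in individual:
--         day_max = {}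
--         for slot_id in individual[day]:
--             entry = individual[day][slot_id]
--             if entry:
--                 faculty = entry['faculty_name']
--                 cur = day_max.get(faculty)
--                 if cur is None or slot_id > cur:
--                     day_max[faculty] = slot_id
--         for max_slot in day_max.values():
--             if max_slot < 5:
--                 score += (5 - max_slot) * 2
--     return score
-- ===== Notes on version B (the rewrite author's own statement) =====
-- stated objective: alternative
-- what changed: Replaces A's global faculty->day->slot-list grouping structure plus a second scoring pass by a single per-day pass that keeps only a day-local faculty->max-slot dict (running max, no lists) and scores it immediately, discarding it before the next day.
import Mathlib
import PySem

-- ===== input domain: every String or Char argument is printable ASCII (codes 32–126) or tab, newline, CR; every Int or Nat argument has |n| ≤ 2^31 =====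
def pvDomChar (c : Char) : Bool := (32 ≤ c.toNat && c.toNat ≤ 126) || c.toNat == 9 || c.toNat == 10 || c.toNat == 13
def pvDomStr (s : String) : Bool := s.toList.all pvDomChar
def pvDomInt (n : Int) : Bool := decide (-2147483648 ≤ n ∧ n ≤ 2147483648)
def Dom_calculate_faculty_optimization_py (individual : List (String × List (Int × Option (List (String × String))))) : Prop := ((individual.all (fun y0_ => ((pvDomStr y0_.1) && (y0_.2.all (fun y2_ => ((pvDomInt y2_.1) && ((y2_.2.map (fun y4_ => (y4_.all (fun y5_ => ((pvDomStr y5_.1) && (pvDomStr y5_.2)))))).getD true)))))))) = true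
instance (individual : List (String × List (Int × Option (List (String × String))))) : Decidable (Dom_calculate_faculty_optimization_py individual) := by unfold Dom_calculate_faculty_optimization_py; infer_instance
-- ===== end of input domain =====

-- B replaces A's global faculty→day→slot-list grouping plus second scoring pass by one per-day
-- pass with a day-local faculty→max-slot dict that is scored immediately (alternative decomposition;
-- return value only, no speed claim).

-- ===== PORT A =====
def calculate_faculty_optimization_py (individual : List (String × List (Int × Option (List (String × String))))) : Int :=
  -- score = 0; faculty_daily_slots = {}; first loop builds the nested dict
  let fds : PySem.Dict String (PySem.Dict String (List Int)) :=
    individual.foldl (fun fds day =>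
      day.2.foldl (fun fds slot =>
        match slot.2 with
        | none => fds            -- entry is None: falsy
        | some e =>
          if e = [] then fds     -- empty entry dict: falsy
          else
            let faculty := (PySem.Dict.mk e).getD "faculty_name" ""  -- Pre_ guarantees the key is present (else KeyError)
            -- 'if faculty not in …: {}' / 'if day not in …: []' / append  ≡  nested modify with those defaults
            fds.modify faculty PySem.Dict.empty
              (fun inner => inner.modify day.1 [] (fun l => l ++ [slot.1]))) fds)
      PySem.Dict.empty
  -- second loop: bonus for early finishes
  fds.items.foldl (fun score fd =>
    fd.2.items.foldl (fun score ds =>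
      if ds.2 ≠ [] then
        match PySem.List.max? ds.2 (fun x => x) with
        | some max_slot => if max_slot < 5 then score + (5 - max_slot) * 2 else score
        | none => score
      else score) score) 0

-- ===== PORT B =====
def calculate_faculty_optimization_py_alt (individual : List (String × List (Int × Option (List (String × String))))) : Int :=
  individual.foldl (fun score day =>
    let day_max : PySem.Dict String Int :=
      day.2.foldl (fun m slot =>
        match slot.2 with
        | none => m
        | some e =>
          if e = [] then m
          else
            let faculty := (PySem.Dict.mk e).getD "faculty_name" ""
            match m.get? faculty with
            | none => m.insert faculty slot.1
            | some cur => if slot.1 > cur then m.insert faculty slot.1 else m)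
        PySem.Dict.empty
    day_max.values.foldl (fun score max_slot =>
      if max_slot < 5 then score + (5 - max_slot) * 2 else score) score) 0

-- ===== PRECONDITION & SPEC =====
-- Pre_ excludes (a) association lists with duplicate day keys, duplicate slot-id keys within a day,
-- or duplicate keys inside an entry dict — those do not denote a Python dict unambiguously — and
-- (b) truthy entry dicts without a 'faculty_name' key, on which A raises KeyError.
def Pre_calculate_faculty_optimization_py (individual : List (String × List (Int × Option (List (String × String))))) : Prop :=
  (individual.map (·.1)).Nodup ∧
  ∀ p ∈ individual, (p.2.map (·.1)).Nodup ∧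
    ∀ q ∈ p.2, ∀ e, q.2 = some e → e ≠ [] →
      ((e.map (·.1)).Nodup ∧ "faculty_name" ∈ e.map (·.1))
instance (individual : List (String × List (Int × Option (List (String × String))))) : Decidable (Pre_calculate_faculty_optimization_py individual) := by unfold Pre_calculate_faculty_optimization_py; infer_instance

def pvWitness_calculate_faculty_optimization_py : (List (String × List (Int × Option (List (String × String))))) :=
  [("Mon", [(1, some [("faculty_name", "X")]), (2, none)]), ("Tue", [(6, some [("faculty_name", "X")])])]

def Spec_calculate_faculty_optimization_py (individual : List (String × List (Int × Option (List (String × String))))) (out : Int) : Prop := out = calculate_faculty_optimization_py_alt individual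
instance (individual : List (String × List (Int × Option (List (String × String))))) (out : Int) : Decidable (Spec_calculate_faculty_optimization_py individual out) := by unfold Spec_calculate_faculty_optimization_py; infer_instance

-- ===== CLAIM (what is proved, stated in full; the proofs are below) =====
def Claim_equal_calculate_faculty_optimization_py : Prop := ∀ (individual : List (String × List (Int × Option (List (String × String))))), Dom_calculate_faculty_optimization_py individual → Pre_calculate_faculty_optimization_py individual → Spec_calculate_faculty_optimization_py individual (calculate_faculty_optimization_py individual)

-- ===== LEMMAS AND PROOFS =====
-- Strategy: characterise A's nested dict (per-faculty inner dicts) and B's day-local max dict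
-- by the same combinatorial data (pvFacs / pvFacSlots), reduce both scoring folds to list sums,
-- and exchange the faculty-major double sum against the day-major one.

def pvFac (o : Option (List (String × String))) : String :=
  match o with
  | some e => (PySem.Dict.mk e).getD "faculty_name" ""
  | none => ""

def pvTruthy (o : Option (List (String × String))) : Bool :=
  match o with
  | some e => decide (e ≠ [])
  | none => false

def pvFacs (sl : List (Int × Option (List (String × String)))) : List String :=
  (sl.filter (fun q => pvTruthy q.2)).map (fun q => pvFac q.2)

def pvFacSlots (f : String) (sl : List (Int × Option (List (String × String)))) : List Int :=
  (sl.filter (fun q => pvTruthy q.2 && (pvFac q.2 == f))).map (fun q => q.1)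

def pvAStep (d : String) (fds : PySem.Dict String (PySem.Dict String (List Int)))
    (slot : Int × Option (List (String × String))) : PySem.Dict String (PySem.Dict String (List Int)) :=
  match slot.2 with
  | none => fds
  | some e =>
    if e = [] then fds
    else
      let faculty := (PySem.Dict.mk e).getD "faculty_name" ""
      fds.modify faculty PySem.Dict.empty
        (fun inner => inner.modify d [] (fun l => l ++ [slot.1]))

lemma pvAStep_eq (d : String) (fds : PySem.Dict String (PySem.Dict String (List Int)))
    (slot : Int × Option (List (String × String))) :
    pvAStep d fds slot =
      if pvTruthy slot.2 then
        fds.modify (pvFac slot.2) PySem.Dict.empty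
          (fun inner => inner.modify d [] (fun l => l ++ [slot.1]))
      else fds := by
  rcases slot with ⟨sid, o⟩
  cases o with
  | none => simp [pvAStep, pvTruthy]
  | some e =>
    by_cases he : e = [] <;> simp [pvAStep, pvTruthy, pvFac, he]

lemma pvFacSlots_append (f : String) (a b : List (Int × Option (List (String × String)))) :
    pvFacSlots f (a ++ b) = pvFacSlots f a ++ pvFacSlots f b := by
  simp [pvFacSlots]

lemma pvFacSlots_eq_nil (f : String) (sl : List (Int × Option (List (String × String)))) :
    pvFacSlots f sl = [] ↔ f ∉ pvFacs sl := by
  induction sl with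
  | nil => simp [pvFacSlots, pvFacs]
  | cons x t ih =>
    by_cases hx : pvTruthy x.2
    · by_cases hf : pvFac x.2 = f
      · simp [pvFacSlots, pvFacs, hx, hf]
      · simp only [pvFacSlots, pvFacs, List.filter_cons, hx] at ih ⊢
        simp only [Bool.and_eq_true, beq_iff_eq] at *
        simp [hf, ih]
        exact fun _ hh => hf hh.symm
    · simp only [pvFacSlots, pvFacs, List.filter_cons] at ih ⊢
      simp [hx, ih]

lemma pvSet_add_mem {s : PySem.Set String} {x : String} (h : x ∈ s) : s.add x = s := by
  simp [PySem.Set.add, PySem.Set.contains, h]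

lemma pvSet_add_not_mem {s : PySem.Set String} {x : String} (h : x ∉ s) : s.add x = s ++ [x] := by
  simp [PySem.Set.add, PySem.Set.contains, h]

lemma pvA_inner (d : String) (sl : List (Int × Option (List (String × String))))
    (fds0 : PySem.Dict String (PySem.Dict String (List Int)))
    (hfresh : ∀ f, (fds0.getD f PySem.Dict.empty).contains d = false)
    (hnd : ∀ f, (fds0.getD f PySem.Dict.empty).keys.Nodup) :
    (∀ f, ((sl.foldl (pvAStep d) fds0).getD f PySem.Dict.empty).items
        = (fds0.getD f PySem.Dict.empty).items
          ++ (if f ∈ pvFacs sl then [(d, pvFacSlots f sl)] else []))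
    ∧ (sl.foldl (pvAStep d) fds0).keys = PySem.Set.update fds0.keys (pvFacs sl) := by
  induction sl using List.reverseRecOn with
  | nil => simp [pvFacs, PySem.Set.update]
  | append_singleton t x ih =>
    obtain ⟨ihG, ihK⟩ := ih
    rw [List.foldl_append, List.foldl_cons, List.foldl_nil, pvAStep_eq]
    by_cases hx : pvTruthy x.2
    · simp only [hx, if_true]
      have hfacs : pvFacs (t ++ [x]) = pvFacs t ++ [pvFac x.2] := by
        simp [pvFacs, hx]
      have hslots : ∀ f, pvFacSlots f (t ++ [x])
          = pvFacSlots f t ++ (if pvFac x.2 = f then [x.1] else []) := by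
        intro f
        rw [pvFacSlots_append]
        by_cases hff : pvFac x.2 = f <;> simp [pvFacSlots, hx, hff]
      constructor
      · intro f
        by_cases hfg : f = pvFac x.2
        · subst hfg
          have hmod : ((t.foldl (pvAStep d) fds0).modify (pvFac x.2) PySem.Dict.empty
                (fun inner => inner.modify d [] (fun l => l ++ [x.1]))).getD (pvFac x.2) PySem.Dict.empty
              = ((t.foldl (pvAStep d) fds0).getD (pvFac x.2) PySem.Dict.empty).modify d [] (fun l => l ++ [x.1]) :=
            PySem.Dict.getD_modify_self _ _ _ _
          rw [hmod]
          set J := (t.foldl (pvAStep d) fds0).getD (pvFac x.2) PySem.Dict.empty with hJ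
          have hJi := ihG (pvFac x.2)
          have hmodins : J.modify d [] (fun l => l ++ [x.1])
              = J.insert d ((J.getD d []) ++ [x.1]) := rfl
          have hdnotin : d ∉ (fds0.getD (pvFac x.2) PySem.Dict.empty).items.map Prod.fst := by
            intro hmemd
            have hcd := (PySem.Dict.contains_iff_mem_keys (fds0.getD (pvFac x.2) PySem.Dict.empty) d).2 hmemd
            rw [hfresh (pvFac x.2)] at hcd; exact Bool.false_ne_true hcd
          by_cases hmem : pvFac x.2 ∈ pvFacs t
          · -- J.items = I0 ++ [(d, L)]
            rw [if_pos hmem] at hJi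
            have hkeysJ : J.keys = ((fds0.getD (pvFac x.2) PySem.Dict.empty).items.map Prod.fst) ++ [d] := by
              show J.items.map Prod.fst = _
              rw [hJi]; simp
            have hndJ : J.keys.Nodup := by
              rw [hkeysJ]
              refine List.Nodup.append (hnd (pvFac x.2)) (List.nodup_singleton d) ?_
              intro a ha hb
              simp at hb; subst hb; exact hdnotin ha
            have hcont : J.contains d = true := by
              rw [PySem.Dict.contains_iff_mem_keys, hkeysJ]; simp
            have hget : J.getD d [] = pvFacSlots (pvFac x.2) t := by
              apply PySem.Dict.getD_of_mem_items J _ hndJ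
              rw [hJi]; simp
            rw [hmodins, hget, PySem.Dict.items_insert_of_contains _ _ hcont, hJi]
            rw [List.map_append]
            have hmap1 : ((fds0.getD (pvFac x.2) PySem.Dict.empty).items.map
                (fun p => if (p.1 == d) = true then (d, pvFacSlots (pvFac x.2) t ++ [x.1]) else p))
                = (fds0.getD (pvFac x.2) PySem.Dict.empty).items := by
              conv_rhs => rw [← List.map_id ((fds0.getD (pvFac x.2) PySem.Dict.empty).items)]
              apply List.map_congr_left
              intro p hp
              have hne : p.1 ≠ d := by
                intro he; exact hdnotin (by rw [← he]; exact List.mem_map_of_mem hp)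
              simp [hne]
            rw [hmap1]
            simp [hfacs, hslots, hmem]
          · rw [if_neg hmem] at hJi
            rw [List.append_nil] at hJi
            have hd0' := hdnotin
            have hcont : J.contains d = false := by
              rw [← Bool.not_eq_true, PySem.Dict.contains_iff_mem_keys]
              show d ∉ J.items.map Prod.fst
              rw [hJi]
              simpa using hd0'
            have hget : J.getD d [] = [] := PySem.Dict.getD_of_not_contains _ _ hcont
            rw [hmodins, hget, PySem.Dict.items_insert_of_not_contains _ _ hcont, hJi]
            have hemp : pvFacSlots (pvFac x.2) t = [] := (pvFacSlots_eq_nil _ _).2 hmem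
            simp [hfacs, hslots, hemp, hmem]
        · have hne : ((t.foldl (pvAStep d) fds0).modify (pvFac x.2) PySem.Dict.empty
                (fun inner => inner.modify d [] (fun l => l ++ [x.1]))).getD f PySem.Dict.empty
              = (t.foldl (pvAStep d) fds0).getD f PySem.Dict.empty :=
            PySem.Dict.getD_modify_of_ne _ _ _ hfg
          rw [hne, ihG f, hfacs]
          have hx1 : (if pvFac x.2 = f then [x.1] else []) = ([] : List Int) :=
            if_neg (fun h => hfg h.symm)
          simp [hslots f, hx1, hfg]
      · -- keys
        rw [PySem.Dict.keys_modify, hfacs, PySem.Set.update, List.foldl_append, List.foldl_cons, List.foldl_nil]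
        have hupd : List.foldl PySem.Set.add fds0.keys (pvFacs t) = (t.foldl (pvAStep d) fds0).keys := by
          rw [ihK]; rfl
        rw [hupd]
        by_cases hc : (t.foldl (pvAStep d) fds0).contains (pvFac x.2) = true
        · rw [PySem.Dict.keys_insert_of_contains _ _ hc,
            pvSet_add_mem ((PySem.Dict.contains_iff_mem_keys _ _).1 hc)]
        · have hc' : (t.foldl (pvAStep d) fds0).contains (pvFac x.2) = false := by
            simpa using hc
          rw [PySem.Dict.keys_insert_of_not_contains _ _ hc',
            pvSet_add_not_mem (fun hm => absurd ((PySem.Dict.contains_iff_mem_keys _ _).2 hm) (by simp [hc']))]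
    · simp only [hx, Bool.false_eq_true, if_false]
      have hfacs : pvFacs (t ++ [x]) = pvFacs t := by
        simp [pvFacs, hx]
      have hslots : ∀ f, pvFacSlots f (t ++ [x]) = pvFacSlots f t := by
        intro f; rw [pvFacSlots_append]; simp [pvFacSlots, hx]
      rw [hfacs]
      exact ⟨fun f => by rw [hslots f]; exact ihG f, ihK⟩

def pvAllFacs (ps : List (String × List (Int × Option (List (String × String))))) : List String :=
  ps.flatMap (fun p => pvFacs p.2)

def pvInner (f : String) (ps : List (String × List (Int × Option (List (String × String))))) :
    List (String × List Int) :=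
  (ps.filter (fun p => decide (f ∈ pvFacs p.2))).map (fun p => (p.1, pvFacSlots f p.2))

lemma pvSet_ofList_append (a b : List String) :
    PySem.Set.ofList (a ++ b) = PySem.Set.update (PySem.Set.ofList a) b := by
  simp [PySem.Set.ofList_eq_foldl, PySem.Set.update, List.foldl_append]

lemma pvA_outer (ps : List (String × List (Int × Option (List (String × String)))))
    (hnd : (ps.map (·.1)).Nodup) :
    (∀ f, (((ps.foldl (fun fds day => day.2.foldl (pvAStep day.1) fds) PySem.Dict.empty)).getD f PySem.Dict.empty).items
        = pvInner f ps)
    ∧ (ps.foldl (fun fds day => day.2.foldl (pvAStep day.1) fds) PySem.Dict.empty).keys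
        = PySem.Set.ofList (pvAllFacs ps) := by
  induction ps using List.reverseRecOn with
  | nil =>
    constructor
    · intro f; rfl
    · simp [pvAllFacs, PySem.Set.ofList_eq_foldl, PySem.Dict.empty]
  | append_singleton t p ih =>
    have hndt : (t.map (·.1)).Nodup := by
      rw [List.map_append] at hnd; exact hnd.of_append_left
    obtain ⟨ihG, ihK⟩ := ih hndt
    have hpnotin : p.1 ∉ t.map (·.1) := by
      rw [List.map_append] at hnd
      have := List.disjoint_of_nodup_append hnd
      intro hm; exact this hm (by simp)
    have hfresh : ∀ f, (((t.foldl (fun fds day => day.2.foldl (pvAStep day.1) fds) PySem.Dict.empty)).getD f PySem.Dict.empty).contains p.1 = false := by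
      intro f
      rw [← Bool.not_eq_true, PySem.Dict.contains_iff_mem_keys]
      show p.1 ∉ (((t.foldl (fun fds day => day.2.foldl (pvAStep day.1) fds) PySem.Dict.empty)).getD f PySem.Dict.empty).items.map Prod.fst
      rw [ihG f]
      intro hm
      simp only [pvInner, List.map_map, List.mem_map] at hm
      obtain ⟨q, hq, hq1⟩ := hm
      exact hpnotin (by
        rw [← hq1]
        exact List.mem_map_of_mem (List.mem_of_mem_filter hq))
    have hndk : ∀ f, (((t.foldl (fun fds day => day.2.foldl (pvAStep day.1) fds) PySem.Dict.empty)).getD f PySem.Dict.empty).keys.Nodup := by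
      intro f
      show ((((t.foldl (fun fds day => day.2.foldl (pvAStep day.1) fds) PySem.Dict.empty)).getD f PySem.Dict.empty).items.map Prod.fst).Nodup
      rw [ihG f]
      have : (pvInner f t).map Prod.fst = (t.filter (fun p => decide (f ∈ pvFacs p.2))).map (·.1) := by
        simp [pvInner, List.map_map]
      rw [this]
      exact hndt.sublist (List.Sublist.map _ (List.filter_sublist))
    have hstep := pvA_inner p.1 p.2 _ hfresh hndk
    rw [List.foldl_append, List.foldl_cons, List.foldl_nil]
    constructor
    · intro f
      rw [hstep.1 f, ihG f]
      by_cases hm : f ∈ pvFacs p.2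
      · simp [pvInner, List.filter_append, hm]
      · simp [pvInner, List.filter_append, hm]
    · rw [hstep.2, ihK]
      have hA : pvAllFacs (t ++ [p]) = pvAllFacs t ++ pvFacs p.2 := by simp [pvAllFacs]
      rw [hA, pvSet_ofList_append]

def pvBonus (l : List Int) : Int :=
  match l with
  | [] => 0
  | a :: t => if t.foldl max a < 5 then (5 - t.foldl max a) * 2 else 0

lemma pvScore_inner (l : List (String × List Int)) (s : Int) :
    l.foldl (fun score ds =>
      if ds.2 ≠ [] then
        match PySem.List.max? ds.2 (fun x => x) with
        | some max_slot => if max_slot < 5 then score + (5 - max_slot) * 2 else score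
        | none => score
      else score) s
    = s + (l.map (fun ds => pvBonus ds.2)).sum := by
  rw [PySem.List.foldl_congr_mem l _ (fun score ds => score + pvBonus ds.2) s ?_, PySem.List.foldl_add]
  intro acc ds _
  rcases ds with ⟨d, sl⟩
  cases sl with
  | nil => simp [pvBonus]
  | cons a tl =>
    simp only [ne_eq, reduceCtorEq, not_false_eq_true, if_true, PySem.List.max?_id_cons, pvBonus]
    by_cases hlt : List.foldl max a tl < 5 <;> simp [hlt]

lemma pvScore_outer (items : List (String × PySem.Dict String (List Int))) (s : Int) :
    items.foldl (fun score fd =>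
      fd.2.items.foldl (fun score ds =>
        if ds.2 ≠ [] then
          match PySem.List.max? ds.2 (fun x => x) with
          | some max_slot => if max_slot < 5 then score + (5 - max_slot) * 2 else score
          | none => score
        else score) score) s
    = s + (items.map (fun fd => ((fd.2.items.map (fun ds => pvBonus ds.2)).sum))).sum := by
  rw [PySem.List.foldl_congr_mem items _
      (fun score fd => score + ((fd.2.items.map (fun ds => pvBonus ds.2)).sum)) s ?_,
    PySem.List.foldl_add]
  intro acc fd _
  exact pvScore_inner _ _

def pvBStep (m : PySem.Dict String Int) (slot : Int × Option (List (String × String))) :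
    PySem.Dict String Int :=
  match slot.2 with
  | none => m
  | some e =>
    if e = [] then m
    else
      let faculty := (PySem.Dict.mk e).getD "faculty_name" ""
      match m.get? faculty with
      | none => m.insert faculty slot.1
      | some cur => if slot.1 > cur then m.insert faculty slot.1 else m

def pvRunMax (l : List Int) : Int :=
  match l with
  | [] => 0
  | a :: t => t.foldl max a

lemma pvBStep_eq (m : PySem.Dict String Int) (slot : Int × Option (List (String × String))) :
    pvBStep m slot =
      if pvTruthy slot.2 then
        match m.get? (pvFac slot.2) with
        | none => m.insert (pvFac slot.2) slot.1
        | some cur => if slot.1 > cur then m.insert (pvFac slot.2) slot.1 else m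
      else m := by
  rcases slot with ⟨sid, o⟩
  cases o with
  | none => simp [pvBStep, pvTruthy]
  | some e => by_cases he : e = [] <;> simp [pvBStep, pvTruthy, pvFac, he]

lemma pvB_day (sl : List (Int × Option (List (String × String)))) :
    (∀ f, (sl.foldl pvBStep PySem.Dict.empty).get? f
        = if f ∈ pvFacs sl then some (pvRunMax (pvFacSlots f sl)) else none)
    ∧ (sl.foldl pvBStep PySem.Dict.empty).keys = PySem.Set.ofList (pvFacs sl) := by
  induction sl using List.reverseRecOn with
  | nil =>
    constructor
    · intro f; simp [pvFacs]
    · simp [pvFacs, PySem.Set.ofList_eq_foldl]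
  | append_singleton t x ih =>
    obtain ⟨ihG, ihK⟩ := ih
    rw [List.foldl_append, List.foldl_cons, List.foldl_nil, pvBStep_eq]
    by_cases hx : pvTruthy x.2
    · simp only [hx, if_true]
      have hfacs : pvFacs (t ++ [x]) = pvFacs t ++ [pvFac x.2] := by
        simp [pvFacs, hx]
      have hslots : ∀ f, pvFacSlots f (t ++ [x])
          = pvFacSlots f t ++ (if pvFac x.2 = f then [x.1] else []) := by
        intro f
        rw [pvFacSlots_append]
        by_cases hff : pvFac x.2 = f <;> simp [pvFacSlots, hx, hff]
      set M := t.foldl pvBStep PySem.Dict.empty with hM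
      by_cases hmem : pvFac x.2 ∈ pvFacs t
      · -- existing faculty: compare with current max
        have hg : M.get? (pvFac x.2) = some (pvRunMax (pvFacSlots (pvFac x.2) t)) := by
          rw [ihG]; simp [hmem]
        rw [hg]
        show (∀ f, (if x.1 > pvRunMax (pvFacSlots (pvFac x.2) t) then M.insert (pvFac x.2) x.1 else M).get? f = if f ∈ pvFacs (t ++ [x]) then some (pvRunMax (pvFacSlots f (t ++ [x]))) else none) ∧ (if x.1 > pvRunMax (pvFacSlots (pvFac x.2) t) then M.insert (pvFac x.2) x.1 else M).keys = PySem.Set.ofList (pvFacs (t ++ [x]))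
        have hLne : pvFacSlots (pvFac x.2) t ≠ [] := by
          intro h; exact ((pvFacSlots_eq_nil _ _).1 h) hmem
        have hrm : pvRunMax (pvFacSlots (pvFac x.2) t ++ [x.1])
            = max (pvRunMax (pvFacSlots (pvFac x.2) t)) x.1 := by
          rcases hL : pvFacSlots (pvFac x.2) t with _ | ⟨a, tl⟩
          · exact absurd hL hLne
          · simp [pvRunMax, List.foldl_append]
        constructor
        · intro f
          by_cases hfg : f = pvFac x.2
          · rw [hfg]
            by_cases hgt : x.1 > pvRunMax (pvFacSlots (pvFac x.2) t)
            · rw [if_pos hgt, PySem.Dict.get?_insert_self]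
              rw [hfacs, hslots (pvFac x.2), if_pos rfl, hrm]
              simp [max_eq_right (le_of_lt hgt)]
            · rw [if_neg hgt, ihG (pvFac x.2)]
              rw [hfacs, hslots (pvFac x.2), if_pos rfl, hrm]
              simp [hmem, max_eq_left (not_lt.1 hgt)]
          · have hstep : (if x.1 > pvRunMax (pvFacSlots (pvFac x.2) t) then M.insert (pvFac x.2) x.1 else M).get? f = M.get? f := by
              split
              · exact PySem.Dict.get?_insert_of_ne _ _ hfg
              · rfl
            rw [hstep, ihG f, hfacs, hslots f]
            simp [hfg, Ne.symm hfg]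
        · have hkeys : (if x.1 > pvRunMax (pvFacSlots (pvFac x.2) t) then M.insert (pvFac x.2) x.1 else M).keys = M.keys := by
            split
            · exact PySem.Dict.keys_insert_of_contains _ _
                (by rw [PySem.Dict.contains_iff_mem_keys, ihK, PySem.Set.mem_ofList]; exact hmem)
            · rfl
          rw [hkeys, ihK, hfacs, pvSet_ofList_append]
          show _ = List.foldl PySem.Set.add _ _
          rw [List.foldl_cons, List.foldl_nil,
            pvSet_add_mem (by rw [PySem.Set.mem_ofList]; exact hmem)]
      · -- new faculty for the day
        have hg : M.get? (pvFac x.2) = none := by rw [ihG]; simp [hmem]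
        rw [hg]
        show (∀ f, (M.insert (pvFac x.2) x.1).get? f = if f ∈ pvFacs (t ++ [x]) then some (pvRunMax (pvFacSlots f (t ++ [x]))) else none) ∧ (M.insert (pvFac x.2) x.1).keys = PySem.Set.ofList (pvFacs (t ++ [x]))
        have hemp : pvFacSlots (pvFac x.2) t = [] := (pvFacSlots_eq_nil _ _).2 hmem
        constructor
        · intro f
          by_cases hfg : f = pvFac x.2
          · rw [hfg, PySem.Dict.get?_insert_self, hfacs, hslots (pvFac x.2), if_pos rfl, hemp]
            simp [pvRunMax]
          · rw [PySem.Dict.get?_insert_of_ne _ _ hfg, ihG f, hfacs, hslots f]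
            simp [hfg, Ne.symm hfg]
        · rw [PySem.Dict.keys_insert_of_not_contains _ _
              (by rw [← Bool.not_eq_true, PySem.Dict.contains_iff_mem_keys, ihK, PySem.Set.mem_ofList]; exact hmem),
            ihK, hfacs, pvSet_ofList_append]
          show _ = List.foldl PySem.Set.add _ _
          rw [List.foldl_cons, List.foldl_nil,
            pvSet_add_not_mem (by rw [PySem.Set.mem_ofList]; exact hmem)]
    · simp only [hx, Bool.false_eq_true, if_false]
      have hfacs : pvFacs (t ++ [x]) = pvFacs t := by simp [pvFacs, hx]
      have hslots : ∀ f, pvFacSlots f (t ++ [x]) = pvFacSlots f t := by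
        intro f; rw [pvFacSlots_append]; simp [pvFacSlots, hx]
      rw [hfacs]
      exact ⟨fun f => by rw [hslots f]; exact ihG f, ihK⟩

def pvBIf (v : Int) : Int := if v < 5 then (5 - v) * 2 else 0

lemma pvSum_map_add {α : Type} (l : List α) (f g : α → Int) :
    (l.map (fun x => f x + g x)).sum = (l.map f).sum + (l.map g).sum := by
  induction l with
  | nil => simp
  | cons a t ih => simp [ih]; ring

lemma pvSum_swap {α β : Type} (A : List α) (B : List β) (f : α → β → Int) :
    (A.map (fun a => (B.map (f a)).sum)).sum = (B.map (fun b => (A.map (fun a => f a b)).sum)).sum := by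
  induction A with
  | nil => simp
  | cons a t ih =>
    simp only [List.map_cons, List.sum_cons, ih, pvSum_map_add]

lemma pvSum_filter {α : Type} (ps : List α) (q : α → Bool) (g : α → Int) :
    ((ps.filter q).map g).sum = (ps.map (fun p => if q p then g p else 0)).sum := by
  induction ps with
  | nil => simp
  | cons a t ih =>
    by_cases hq : q a <;> simp [hq, ih]

lemma pvSum_sub (F : List String) (hF : F.Nodup) (xs : List String)
    (hsub : ∀ y ∈ xs, y ∈ F) (h : String → Int) :
    (F.map (fun y => if y ∈ xs then h y else 0)).sum = ((PySem.Set.ofList xs).map h).sum := by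
  rw [← List.sum_toFinset _ hF, ← List.sum_toFinset _ (PySem.Set.nodup_ofList xs)]
  have h1 : ∀ y, (y ∈ xs) = (y ∈ xs.toFinset) := by
    intro y; simp [List.mem_toFinset]
  simp only [h1]
  rw [Finset.sum_ite_mem]
  have h2 : F.toFinset ∩ xs.toFinset = xs.toFinset := by
    apply Finset.inter_eq_right.2
    intro y hy
    simp only [List.mem_toFinset] at *
    exact hsub y hy
  have h3 : (PySem.Set.ofList xs).toFinset = xs.toFinset := by
    ext y; simp [List.mem_toFinset, PySem.Set.mem_ofList]
  rw [h2, h3]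


lemma pvB_value (ind : List (String × List (Int × Option (List (String × String))))) :
    calculate_faculty_optimization_py_alt ind
      = (ind.map (fun p => ((PySem.Set.ofList (pvFacs p.2)).map (fun f => pvBonus (pvFacSlots f p.2))).sum)).sum := by
  show ind.foldl (fun score day =>
      (day.2.foldl pvBStep PySem.Dict.empty).values.foldl
        (fun score max_slot => if max_slot < 5 then score + (5 - max_slot) * 2 else score) score) 0 = _
  rw [PySem.List.foldl_congr_mem ind _
      (fun score day => score + ((PySem.Set.ofList (pvFacs day.2)).map (fun f => pvBonus (pvFacSlots f day.2))).sum) 0 ?_,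
    PySem.List.foldl_add]
  · simp
  intro acc day _
  obtain ⟨hG, hK⟩ := pvB_day day.2
  have hnodup : (day.2.foldl pvBStep PySem.Dict.empty).keys.Nodup := by
    rw [hK]; exact PySem.Set.nodup_ofList _
  have hvals : (day.2.foldl pvBStep PySem.Dict.empty).values
      = (PySem.Set.ofList (pvFacs day.2)).map (fun f => (day.2.foldl pvBStep PySem.Dict.empty).getD f 0) := by
    rw [PySem.Dict.values_eq_map_keys _ hnodup 0, hK]
  rw [hvals]
  rw [PySem.List.foldl_congr_mem _ _ (fun score v => score + pvBIf v) acc ?_, PySem.List.foldl_add]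
  · congr 1
    rw [List.map_map]
    simp only [Function.comp_def]
    refine congrArg List.sum ?_
    apply List.map_congr_left
    intro f hf
    have hfm : f ∈ pvFacs day.2 := (PySem.Set.mem_ofList _ _).1 hf
    have hgd : (day.2.foldl pvBStep PySem.Dict.empty).getD f 0 = pvRunMax (pvFacSlots f day.2) := by
      rw [PySem.Dict.getD_eq_get?_getD, hG f, if_pos hfm]; rfl
    show pvBIf ((day.2.foldl pvBStep PySem.Dict.empty).getD f 0) = pvBonus (pvFacSlots f day.2)
    rw [hgd]
    have hne : pvFacSlots f day.2 ≠ [] := fun h => ((pvFacSlots_eq_nil _ _).1 h) hfm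
    rcases hL : pvFacSlots f day.2 with _ | ⟨a, tl⟩
    · exact absurd hL hne
    · simp [pvRunMax, pvBonus, pvBIf]
  · intro acc2 v _
    show _ = acc2 + pvBIf v
    by_cases hv : v < 5 <;> simp [pvBIf, hv]

lemma pvA_value (ind : List (String × List (Int × Option (List (String × String)))))
    (hnd : (ind.map (·.1)).Nodup) :
    calculate_faculty_optimization_py ind
      = ((PySem.Set.ofList (pvAllFacs ind)).map
          (fun f => ((pvInner f ind).map (fun ds => pvBonus ds.2)).sum)).sum := by
  obtain ⟨hG, hK⟩ := pvA_outer ind hnd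
  show (ind.foldl (fun fds day => day.2.foldl (pvAStep day.1) fds) PySem.Dict.empty).items.foldl
        (fun score fd =>
          fd.2.items.foldl (fun score ds =>
            if ds.2 ≠ [] then
              match PySem.List.max? ds.2 (fun x => x) with
              | some max_slot => if max_slot < 5 then score + (5 - max_slot) * 2 else score
              | none => score
            else score) score) 0 = _
  rw [pvScore_outer]
  set F := ind.foldl (fun fds day => day.2.foldl (pvAStep day.1) fds) PySem.Dict.empty with hF
  have hnodup : F.keys.Nodup := by rw [hK]; exact PySem.Set.nodup_ofList _
  rw [PySem.Dict.items_eq_map_keys F hnodup PySem.Dict.empty, hK, List.map_map]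
  simp only [zero_add]
  apply congrArg
  apply List.map_congr_left
  intro f hf
  show ((F.getD f PySem.Dict.empty).items.map (fun ds => pvBonus ds.2)).sum = _
  rw [hG f]

lemma pvExchange (ind : List (String × List (Int × Option (List (String × String))))) :
    ((PySem.Set.ofList (pvAllFacs ind)).map
        (fun f => ((pvInner f ind).map (fun ds => pvBonus ds.2)).sum)).sum
      = (ind.map (fun p => ((PySem.Set.ofList (pvFacs p.2)).map (fun f => pvBonus (pvFacSlots f p.2))).sum)).sum := by
  have h1 : ∀ f, ((pvInner f ind).map (fun ds => pvBonus ds.2)).sum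
      = (ind.map (fun p => if f ∈ pvFacs p.2 then pvBonus (pvFacSlots f p.2) else 0)).sum := by
    intro f
    rw [pvInner, List.map_map]
    have hsf := pvSum_filter ind (fun p => decide (f ∈ pvFacs p.2)) (fun p => pvBonus (pvFacSlots f p.2))
    simp only [decide_eq_true_eq] at hsf
    simp only [Function.comp_def]
    rw [hsf]
  simp only [h1]
  rw [pvSum_swap]
  apply congrArg
  apply List.map_congr_left
  intro p hp
  exact pvSum_sub _ (PySem.Set.nodup_ofList _) (pvFacs p.2)
    (fun y hy => (PySem.Set.mem_ofList _ _).2 (List.mem_flatMap.2 ⟨p, hp, hy⟩)) _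

-- ===== VERDICT (by name: the statement is the Claim_ definition above) =====
theorem calculate_faculty_optimization_py_spec : Claim_equal_calculate_faculty_optimization_py := by
  intro ind _hdom hpre
  unfold Spec_calculate_faculty_optimization_py
  rw [pvA_value ind hpre.1, pvExchange, ← pvB_value]
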